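-- pv_equiv track=rewrite | github.com/HorvathDawson/BC-freshwater-fishing-regulations | scripts/synopsis_pipeline/compare_sessions.py | scopes_are_meaningfully_different
-- ===== SOURCE A (Python) =====
-- def normalize_scope_for_comparison(scope_type, location_text):
--     """Normalize scope information for more meaningful comparisons."""
--     if not location_text:
--         return (scope_type, None)
--
--     # Normalize common variations
--     normalized = location_text.lower().strip()
--
--     # Remove common prefixes that don't change meaning
--     common_prefixes = ["on ", "in ", "at ", "of "]
--     for prefix in common_prefixes:
--         if normalized.startswith(prefix) and len(normalized) > len(prefix):
--             # Check if removing prefix still leaves meaningful text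
--             remaining = normalized[len(prefix) :]
--             if remaining and not remaining[0].isspace():
--                 # Temporarily remove to check if it's just a preposition
--                 test_normalized = remaining
--                 break
--     else:
--         test_normalized = normalized
--
--     # Remove common suffixes/markers that don't change meaning
--     test_normalized = test_normalized.replace("on parts", "parts")
--     test_normalized = test_normalized.replace("in parts", "parts")
--     test_normalized = test_normalized.replace("all parts", "parts")
--     test_normalized = test_normalized.replace("in all parts", "parts")
--     test_normalized = test_normalized.replace("[includes tributaries]", "")
--     test_normalized = test_normalized.strip()
--
--     # Remove extra whitespace
--     test_normalized = " ".join(test_normalized.split())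
--
--     return (scope_type, test_normalized if test_normalized else None)
--
-- def scopes_are_meaningfully_different(scopes1, scopes2):
--     """Check if two scope lists are meaningfully different (not just minor text variations)."""
--     if len(scopes1) != len(scopes2):
--         return True
--
--     # Normalize both scope lists
--     norm_scopes1 = [normalize_scope_for_comparison(s[0], s[1]) for s in scopes1]
--     norm_scopes2 = [normalize_scope_for_comparison(s[0], s[1]) for s in scopes2]
--
--     # Sort for comparison (order might not matter) - handle None values
--     def sort_key(scope_tuple):
--         scope_type, location = scope_tuple
--         return (scope_type or "", location or "")
--
--     norm_scopes1.sort(key=sort_key)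
--     norm_scopes2.sort(key=sort_key)
--
--     return norm_scopes1 != norm_scopes2
-- ===== SOURCE B (Python) =====
-- _PREFIXES = ("on ", "in ", "at ", "of ")
-- _REPLACEMENTS = (
--     ("on parts", "parts"),
--     ("in parts", "parts"),
--     ("all parts", "parts"),
--     ("in all parts", "parts"),
--     ("[includes tributaries]", ""),
-- )
--
--
-- def _normalize(scope_type, location_text):
--     """Normalize one scope pair (same normalization, pipeline-style)."""
--     if not location_text:
--         return (scope_type, None)
--     t = location_text.lower().strip()
--     # all prefixes are 3 chars and mutually exclusive, so the prefix scan of the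
--     # original collapses to one slice-membership test
--     if len(t) > 3 and t[:3] in _PREFIXES and not t[3].isspace():
--         t = t[3:]
--     for old, new in _REPLACEMENTS:
--         t = t.replace(old, new)
--     t = " ".join(t.strip().split())
--     return (scope_type, t or None)
--
--
-- def _counts(scopes):
--     """Frequency table (multiset) of the normalized scopes."""
--     c = {}
--     for s in scopes:
--         k = _normalize(s[0], s[1])
--         c[k] = c.get(k, 0) + 1
--     return c
--
--
-- def scopes_are_meaningfully_different(scopes1, scopes2):
--     """Check if two scope lists are meaningfully different (not just minor text variations)."""
--     return _counts(scopes1) != _counts(scopes2)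
-- ===== Notes on version B (the rewrite author's own statement) =====
-- stated objective: idiomatic
-- what changed: B drops the sort and the sort_key helper, comparing a frequency dictionary (multiset) of normalized tuples instead of sorted lists, drops the length pre-check (unequal lengths already give unequal tables), and restructures the normalization: the 4-way prefix for/else loop collapses to one slice-membership test and the replace chain becomes a fold over a replacement table.
-- outside the precondition, e.g. on scopes_are_meaningfully_different([(None, 'x'), ('', 'x')], [('', 'x'), (None, 'x')]): A returns True, B returns False
import Mathlib
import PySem

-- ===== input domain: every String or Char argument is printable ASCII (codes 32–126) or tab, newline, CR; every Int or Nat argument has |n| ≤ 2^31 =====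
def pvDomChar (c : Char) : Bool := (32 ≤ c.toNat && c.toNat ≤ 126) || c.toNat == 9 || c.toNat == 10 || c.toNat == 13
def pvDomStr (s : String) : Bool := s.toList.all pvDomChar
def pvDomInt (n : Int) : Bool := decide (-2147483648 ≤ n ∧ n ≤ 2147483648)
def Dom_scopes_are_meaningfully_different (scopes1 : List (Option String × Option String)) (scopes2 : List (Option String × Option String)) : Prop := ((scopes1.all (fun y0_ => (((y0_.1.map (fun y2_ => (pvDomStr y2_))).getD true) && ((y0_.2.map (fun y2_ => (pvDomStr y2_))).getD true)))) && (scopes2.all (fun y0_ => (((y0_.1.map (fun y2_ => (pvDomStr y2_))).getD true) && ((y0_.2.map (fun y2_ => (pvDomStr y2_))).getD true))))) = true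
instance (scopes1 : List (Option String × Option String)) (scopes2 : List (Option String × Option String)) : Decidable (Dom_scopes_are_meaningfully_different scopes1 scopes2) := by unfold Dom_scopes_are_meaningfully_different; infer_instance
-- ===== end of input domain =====

-- ===== PORT A =====
-- B replaces A's sort-then-compare of the normalized lists by a frequency-dictionary
-- (multiset) comparison with a restructured normalization; objective: idiomatic (no speed claim).

-- the for/else prefix loop of A's normalize_scope_for_comparison
def pvPickPrefix (normalized : List Char) : List (List Char) → List Char
  | [] => normalized                                   -- for-else: no break
  | p :: rest =>
    if PySem.Chars.startswith normalized p && decide (p.length < normalized.length) then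
      let remaining := PySem.List.slice normalized (some (p.length : Int)) none
      match remaining with
      | [] => pvPickPrefix normalized rest             -- `remaining` falsy: no break
      | c :: _ =>
        if PySem.Chars.strIsspace [c] then pvPickPrefix normalized rest
        else remaining                                 -- break
    else pvPickPrefix normalized rest

-- A's normalize_scope_for_comparison
def pvNormalizeA (scope_type : Option String) (location_text : Option String) :
    Option String × Option String :=
  match location_text with
  | none => (scope_type, none)
  | some s =>
    if s.toList = [] then (scope_type, none)           -- "if not location_text"
    else
      let normalized := PySem.Chars.strip (PySem.Chars.lower s.toList)
      let t0 := pvPickPrefix normalized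
        [['o','n',' '], ['i','n',' '], ['a','t',' '], ['o','f',' ']]
      let t1 := PySem.Chars.replace t0 ['o','n',' ','p','a','r','t','s'] ['p','a','r','t','s']
      let t2 := PySem.Chars.replace t1 ['i','n',' ','p','a','r','t','s'] ['p','a','r','t','s']
      let t3 := PySem.Chars.replace t2 ['a','l','l',' ','p','a','r','t','s'] ['p','a','r','t','s']
      let t4 := PySem.Chars.replace t3
        ['i','n',' ','a','l','l',' ','p','a','r','t','s'] ['p','a','r','t','s']
      let t5 := PySem.Chars.replace t4
        ['[','i','n','c','l','u','d','e','s',' ','t','r','i','b','u','t','a','r','i','e','s',']'] []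
      let t6 := PySem.Chars.strip t5
      let t7 := PySem.Chars.join [' '] (PySem.Chars.split₀ t6)   -- " ".join(t.split())
      (scope_type, if t7 = [] then none else some (String.ofList t7))

def scopes_are_meaningfully_different (scopes1 : List (Option String × Option String)) (scopes2 : List (Option String × Option String)) : Bool :=
  if scopes1.length ≠ scopes2.length then true
  else
    let norm_scopes1 := scopes1.map (fun s => pvNormalizeA s.1 s.2)
    let norm_scopes2 := scopes2.map (fun s => pvNormalizeA s.1 s.2)
    -- .sort(key=sort_key) with sort_key = (scope_type or "", location or "")
    let sorted1 := PySem.List.sorted2 norm_scopes1 (fun p => p.1.getD "") (fun p => p.2.getD "") false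
    let sorted2 := PySem.List.sorted2 norm_scopes2 (fun p => p.1.getD "") (fun p => p.2.getD "") false
    decide (sorted1 ≠ sorted2)

-- ===== PORT B =====
def pvPrefixesB : List (List Char) := [['o','n',' '], ['i','n',' '], ['a','t',' '], ['o','f',' ']]

def pvReplacementsB : List (List Char × List Char) :=
  [ (['o','n',' ','p','a','r','t','s'], ['p','a','r','t','s'])
  , (['i','n',' ','p','a','r','t','s'], ['p','a','r','t','s'])
  , (['a','l','l',' ','p','a','r','t','s'], ['p','a','r','t','s'])
  , (['i','n',' ','a','l','l',' ','p','a','r','t','s'], ['p','a','r','t','s'])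
  , (['[','i','n','c','l','u','d','e','s',' ','t','r','i','b','u','t','a','r','i','e','s',']'], []) ]

-- B's one-shot prefix test: `len(t) > 3 and t[:3] in _PREFIXES and not t[3].isspace()`.
-- exact: the four-cons pattern is `len(t) > 3`, [a,b,c] is t[:3], d is t[3], d::rest is t[3:].
def pvStripPrefixB (t : List Char) : List Char :=
  match t with
  | a :: b :: c :: d :: rest =>
    if decide ([a, b, c] ∈ pvPrefixesB) && !(PySem.Chars.strIsspace [d]) then d :: rest else t
  | _ => t

-- B's _normalize (pipeline form)
def pvNormB (scope_type : Option String) (location_text : Option String) :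
    Option String × Option String :=
  match location_text with
  | none => (scope_type, none)
  | some s =>
    if s.toList = [] then (scope_type, none)           -- "if not location_text"
    else
      let t := pvStripPrefixB (PySem.Chars.strip (PySem.Chars.lower s.toList))
      let t := pvReplacementsB.foldl (fun u r => PySem.Chars.replace u r.1 r.2) t
      let t := PySem.Chars.join [' '] (PySem.Chars.split₀ (PySem.Chars.strip t))
      (scope_type, if t = [] then none else some (String.ofList t))

-- B's _counts: frequency dict of the normalized scopes
def pvCountsB (scopes : List (Option String × Option String)) :
    PySem.Dict (Option String × Option String) Int :=
  scopes.foldl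
    (fun counts s =>
      let key := pvNormB s.1 s.2
      counts.insert key (counts.getD key 0 + 1))
    PySem.Dict.empty

-- Python dict ==: same key -> value mapping, insertion order ignored
def pvDictEqB (d1 d2 : PySem.Dict (Option String × Option String) Int) : Bool :=
  (d1.items.all fun kv => d2.get? kv.1 == some kv.2) &&
  (d2.items.all fun kv => d1.get? kv.1 == some kv.2)

def scopes_are_meaningfully_different_alt (scopes1 : List (Option String × Option String)) (scopes2 : List (Option String × Option String)) : Bool :=
  !(pvDictEqB (pvCountsB scopes1) (pvCountsB scopes2))

-- ===== PRECONDITION & SPEC =====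
-- Pre_ excludes inputs in which one list mixes a None scope_type with an empty-string
-- scope_type "": A's sort key conflates "" with None, so only there can distinct tuples
-- tie under the key and A's answer depend on the accidental stable-sort tie order, a
-- corner no caller specifies; B's order-free multiset comparison makes the other
-- defensible choice there.
def Pre_scopes_are_meaningfully_different (scopes1 : List (Option String × Option String)) (scopes2 : List (Option String × Option String)) : Prop :=
  (¬ ((∃ p ∈ scopes1, p.1 = none) ∧ (∃ p ∈ scopes1, p.1 = some ""))) ∧
  (¬ ((∃ p ∈ scopes2, p.1 = none) ∧ (∃ p ∈ scopes2, p.1 = some "")))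
instance (scopes1 : List (Option String × Option String)) (scopes2 : List (Option String × Option String)) : Decidable (Pre_scopes_are_meaningfully_different scopes1 scopes2) := by unfold Pre_scopes_are_meaningfully_different; infer_instance

def pvWitness_scopes_are_meaningfully_different : (List (Option String × Option String)) × (List (Option String × Option String)) :=
  ([(some "river", some "On the Fraser River"), (none, none)],
   [(none, none), (some "river", some "fraser river")])

def Spec_scopes_are_meaningfully_different (scopes1 : List (Option String × Option String)) (scopes2 : List (Option String × Option String)) (out : Bool) : Prop := out = scopes_are_meaningfully_different_alt scopes1 scopes2
instance (scopes1 : List (Option String × Option String)) (scopes2 : List (Option String × Option String)) (out : Bool) : Decidable (Spec_scopes_are_meaningfully_different scopes1 scopes2 out) := by unfold Spec_scopes_are_meaningfully_different; infer_instance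

-- ===== CLAIM (what is proved, stated in full; the proofs are below) =====
def Claim_equal_scopes_are_meaningfully_different : Prop := ∀ (scopes1 : List (Option String × Option String)) (scopes2 : List (Option String × Option String)), Dom_scopes_are_meaningfully_different scopes1 scopes2 → Pre_scopes_are_meaningfully_different scopes1 scopes2 → Spec_scopes_are_meaningfully_different scopes1 scopes2 (scopes_are_meaningfully_different scopes1 scopes2)

-- ===== LEMMAS AND PROOFS =====

-- the two normalizers agree: B's slice-membership prefix test equals A's for/else scan
lemma pv_startswith3 (a b c d : Char) (rest : List Char) (p1 p2 p3 : Char) :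
    PySem.Chars.startswith (a :: b :: c :: d :: rest) [p1, p2, p3]
      = (decide (a = p1) && decide (b = p2) && decide (c = p3)) := by
  rw [Bool.eq_iff_iff, PySem.Chars.startswith_iff]
  simp only [List.cons_prefix_cons, List.nil_prefix, and_true, Bool.and_eq_true,
    decide_eq_true_eq, and_assoc]
  tauto

lemma pv_pick_short (n : List Char) (hn : n.length ≤ 3) :
    ∀ ps : List (List Char), (∀ p ∈ ps, p.length = 3) → pvPickPrefix n ps = n := by
  intro ps
  induction ps with
  | nil => intro _; rfl
  | cons p rest ih =>
    intro h
    have hp : p.length = 3 := h p List.mem_cons_self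
    have hlt : decide (p.length < n.length) = false := by
      rw [decide_eq_false_iff_not]; omega
    simp only [pvPickPrefix, hlt, Bool.and_false, Bool.false_eq_true, if_false]
    exact ih (fun q hq => h q (List.mem_cons_of_mem p hq))

lemma pv_slice3 (a b c d : Char) (rest : List Char) :
    PySem.List.slice (a :: b :: c :: d :: rest) (some (3 : Int)) none = d :: rest := by
  have h := PySem.List.slice_from_natCast (a :: b :: c :: d :: rest) 3
  norm_num at h
  exact h

lemma pv_pick_eq_strip (n : List Char) :
    pvPickPrefix n [['o','n',' '], ['i','n',' '], ['a','t',' '], ['o','f',' ']]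
      = pvStripPrefixB n := by
  match n with
  | [] => rw [pv_pick_short] <;> simp [pvStripPrefixB]
  | [a] => rw [pv_pick_short] <;> simp [pvStripPrefixB]
  | [a, b] => rw [pv_pick_short] <;> simp [pvStripPrefixB]
  | [a, b, c] => rw [pv_pick_short] <;> simp [pvStripPrefixB]
  | a :: b :: c :: d :: rest =>
    have hs := pv_slice3 a b c d rest
    have hlt : (0 + 1 + 1 + 1 : Nat) < rest.length + 1 + 1 + 1 + 1 := by omega
    simp only [pvPickPrefix, pv_startswith3, List.length_cons, List.length_nil,
      hlt, decide_true, Bool.and_true]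
    norm_num [hs, pvStripPrefixB, pvPrefixesB]
    by_cases h1 : a = 'o' ∧ b = 'n' ∧ c = ' ' <;>
      by_cases h2 : a = 'i' ∧ b = 'n' ∧ c = ' ' <;>
        by_cases h3 : a = 'a' ∧ b = 't' ∧ c = ' ' <;>
          by_cases h4 : a = 'o' ∧ b = 'f' ∧ c = ' ' <;>
            by_cases hd : PySem.Chars.strIsspace [d] = true <;>
              first | (simp_all; split_ifs <;> simp_all <;> tauto) | simp_all

lemma pvNormB_eq (a b : Option String) : pvNormB a b = pvNormalizeA a b := by
  cases b with
  | none => rfl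
  | some s =>
    conv_lhs => simp only [pvNormB, pvReplacementsB, List.foldl_cons, List.foldl_nil,
      ← pv_pick_eq_strip]
    conv_rhs => simp only [pvNormalizeA]

-- the sort key, packaged as one key into the lexicographic order on String x String
def pvKey (p : Option String × Option String) : Lex (String × String) :=
  toLex (p.1.getD "", p.2.getD "")

-- A's two-component sort is the sort by the lexicographic key
lemma pv_sorted2_eq_sorted_lex (xs : List (Option String × Option String)) :
    PySem.List.sorted2 xs (fun p => p.1.getD "") (fun p => p.2.getD "") false
      = PySem.List.sorted xs pvKey false := by
  have hbe : (fun (a b : Option String × Option String) =>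
        decide (a.1.getD "" < b.1.getD "") ||
          (!decide (b.1.getD "" < a.1.getD "") && decide (a.2.getD "" < b.2.getD "")))
      = (fun a b => decide (pvKey a < pvKey b)) := by
    funext a b
    rcases lt_trichotomy (a.1.getD "") (b.1.getD "") with h | h | h
    · simp [pvKey, Prod.Lex.lt_iff, h]
    · simp [pvKey, Prod.Lex.lt_iff, h]
    · simp [pvKey, Prod.Lex.lt_iff, h, not_lt_of_gt h, h.ne']
  calc PySem.List.sorted2 xs (fun p => p.1.getD "") (fun p => p.2.getD "") false
      = List.foldl (fun acc x => PySem.List.insertBy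
          (fun a b => decide (a.1.getD "" < b.1.getD "") ||
            (!decide (b.1.getD "" < a.1.getD "") && decide (a.2.getD "" < b.2.getD ""))) x acc)
          [] xs := rfl
    _ = List.foldl (fun acc x => PySem.List.insertBy
          (fun a b => decide (pvKey a < pvKey b)) x acc) [] xs := by rw [hbe]
    _ = PySem.List.sorted xs pvKey false := (PySem.List.sorted_eq_foldl_insertBy xs pvKey).symm

-- a key-sorted list is determined by its multiset when the key separates its elements
lemma pv_eq_of_perm_of_pairwise {α κ : Type} [LinearOrder κ] (k : α → κ) :
    ∀ (l1 l2 : List α), l1.Perm l2 →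
      l1.Pairwise (fun a b => k a ≤ k b) → l2.Pairwise (fun a b => k a ≤ k b) →
      (∀ a ∈ l1, ∀ b ∈ l1, k a = k b → a = b) → l1 = l2 := by
  intro l1
  induction l1 with
  | nil => intro l2 hp _ _ _; exact hp.nil_eq
  | cons a t ih =>
    intro l2 hp hp1 hp2 hinj
    cases l2 with
    | nil => exact absurd hp.symm.nil_eq (by simp)
    | cons b t2 =>
      have hb1 : b ∈ a :: t := hp.symm.subset List.mem_cons_self
      have ha2 : a ∈ b :: t2 := hp.subset List.mem_cons_self
      have hab : k a ≤ k b := by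
        rcases List.mem_cons.mp hb1 with h | h
        · rw [h]
        · exact (List.pairwise_cons.mp hp1).1 b h
      have hba : k b ≤ k a := by
        rcases List.mem_cons.mp ha2 with h | h
        · rw [h]
        · exact (List.pairwise_cons.mp hp2).1 a h
      have heq : a = b := hinj a List.mem_cons_self b hb1 (le_antisymm hab hba)
      subst heq
      have ht : t.Perm t2 := hp.cons_inv
      have := ih t2 ht (List.pairwise_cons.mp hp1).2 (List.pairwise_cons.mp hp2).2
        (fun x hx y hy hxy => hinj x (List.mem_cons_of_mem a hx) y (List.mem_cons_of_mem a hy) hxy)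
      rw [this]

lemma pv_sorted_eq_iff_perm {α κ : Type} [LinearOrder κ] (k : α → κ) (xs ys : List α)
    (hinj : ∀ a ∈ xs, ∀ b ∈ xs, k a = k b → a = b) :
    PySem.List.sorted xs k false = PySem.List.sorted ys k false ↔ xs.Perm ys := by
  constructor
  · intro h
    exact (PySem.List.sorted_perm xs k false).symm.trans
      (h ▸ PySem.List.sorted_perm ys k false)
  · intro hp
    apply pv_eq_of_perm_of_pairwise k
    · exact (PySem.List.sorted_perm xs k false).trans
        (hp.trans (PySem.List.sorted_perm ys k false).symm)
    · exact PySem.List.sorted_pairwise xs k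
    · exact PySem.List.sorted_pairwise ys k
    · intro p hp1 q hq1 hk
      exact hinj p ((PySem.List.mem_sorted _ _ _ _).mp hp1) q
        ((PySem.List.mem_sorted _ _ _ _).mp hq1) hk

-- pvNormalizeA keeps the scope_type and never returns the location some ""
lemma pvNormalizeA_fst (a b : Option String) : (pvNormalizeA a b).1 = a := by
  cases b with
  | none => rfl
  | some s => by_cases h : s.toList = [] <;> simp [pvNormalizeA, h]

lemma pvNormalizeA_snd_ne (a b : Option String) : (pvNormalizeA a b).2 ≠ some "" := by
  cases b with
  | none => simp [pvNormalizeA]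
  | some s =>
    by_cases h : s.toList = []
    · simp [pvNormalizeA, h]
    · simp only [pvNormalizeA, if_neg h]
      split
      · simp
      · rename_i ht
        intro hc
        simp only [Option.some.injEq] at hc
        exact ht (by simpa using congrArg String.toList hc)

-- pvKey separates pairs that do not mix None with some "" in the first component
-- and avoid some "" in the second
lemma pvKey_inj (p q : Option String × Option String)
    (h1 : (p.1 ≠ some "" ∧ q.1 ≠ some "") ∨ (p.1 ≠ none ∧ q.1 ≠ none))
    (hp2 : p.2 ≠ some "") (hq2 : q.2 ≠ some "")
    (h : pvKey p = pvKey q) : p = q := by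
  unfold pvKey at h
  rw [toLex_inj, Prod.mk.injEq] at h
  have h1 : p.1 = q.1 := by
    rcases h1 with ⟨hp1, hq1⟩ | ⟨hp1, hq1⟩
    · cases hp : p.1 with
      | none =>
        cases hq : q.1 with
        | none => rfl
        | some t => rw [hp, hq] at h; simp at h; exact absurd (by rw [hq, ← h.1]) hq1
      | some t =>
        cases hq : q.1 with
        | none => rw [hp, hq] at h; simp at h; exact absurd (by rw [hp, h.1]) hp1
        | some u => rw [hp, hq] at h; simpa using h.1
    · cases hp : p.1 with
      | none => exact absurd hp hp1
      | some t =>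
        cases hq : q.1 with
        | none => exact absurd hq hq1
        | some u => rw [hp, hq] at h; simpa using h.1
  have h2 : p.2 = q.2 := by
    cases hp : p.2 with
    | none =>
      cases hq : q.2 with
      | none => rfl
      | some t => rw [hp, hq] at h; simp at h; exact absurd (by rw [hq, ← h.2]) hq2
    | some t =>
      cases hq : q.2 with
      | none => rw [hp, hq] at h; simp at h; exact absurd (by rw [hp, h.2]) hp2
      | some u => rw [hp, hq] at h; simpa using h.2
  exact Prod.ext h1 h2

lemma pv_get?_counter (xs : List (Option String × Option String))
    (k : Option String × Option String) :
    (PySem.Dict.counter xs).get? k = if k ∈ xs then some ((xs.count k : Int)) else none := by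
  have hsome : ((PySem.Dict.counter xs).get? k).isSome = (PySem.Dict.counter xs).contains k := by
    simp only [PySem.Dict.get?, PySem.Dict.contains, Option.isSome_map]
    exact List.isSome_find?
  rw [PySem.Dict.contains_counter] at hsome
  have hgd : ((PySem.Dict.counter xs).get? k).getD 0 = (xs.count k : Int) :=
    PySem.Dict.getD_counter xs k
  by_cases h : k ∈ xs
  · have : ((PySem.Dict.counter xs).get? k).isSome := by
      rw [hsome]; exact List.elem_eq_true_of_mem h
    obtain ⟨v, hv⟩ := Option.isSome_iff_exists.mp this
    rw [hv] at hgd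
    simp only [Option.getD_some] at hgd
    rw [hv, hgd, if_pos h]
  · have : ¬ ((PySem.Dict.counter xs).get? k).isSome := by
      rw [hsome]; simpa using h
    rw [if_neg h]
    exact Option.not_isSome_iff_eq_none.mp this

lemma pvDictEqB_counter_iff (n1 n2 : List (Option String × Option String)) :
    pvDictEqB (PySem.Dict.counter n1) (PySem.Dict.counter n2) = true ↔ n1.Perm n2 := by
  constructor
  · intro h
    simp only [pvDictEqB, Bool.and_eq_true, List.all_eq_true] at h
    obtain ⟨h1, h2⟩ := h
    rw [List.perm_iff_count]
    intro v
    by_cases hv1 : v ∈ n1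
    · have hitem : (v, (n1.count v : Int)) ∈ (PySem.Dict.counter n1).items := by
        rw [PySem.Dict.items_counter]
        exact List.mem_map.mpr ⟨v, (PySem.Set.mem_ofList _ _).mpr hv1, rfl⟩
      have hh := h1 _ hitem
      rw [beq_iff_eq, pv_get?_counter] at hh
      by_cases hv2 : v ∈ n2
      · rw [if_pos hv2] at hh
        simpa using hh.symm
      · rw [if_neg hv2] at hh
        exact absurd hh (by simp)
    · by_cases hv2 : v ∈ n2
      · have hitem : (v, (n2.count v : Int)) ∈ (PySem.Dict.counter n2).items := by
          rw [PySem.Dict.items_counter]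
          exact List.mem_map.mpr ⟨v, (PySem.Set.mem_ofList _ _).mpr hv2, rfl⟩
        have hh := h2 _ hitem
        rw [beq_iff_eq, pv_get?_counter, if_neg hv1] at hh
        exact absurd hh (by simp)
      · rw [List.count_eq_zero_of_not_mem hv1, List.count_eq_zero_of_not_mem hv2]
  · intro hp
    have hcnt := List.perm_iff_count.mp hp
    simp only [pvDictEqB, Bool.and_eq_true, List.all_eq_true]
    constructor
    · intro kv hkv
      rw [PySem.Dict.items_counter] at hkv
      obtain ⟨x, hx, rfl⟩ := List.mem_map.mp hkv
      have hx2 : x ∈ n2 := hp.subset ((PySem.Set.mem_ofList _ _).mp hx)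
      rw [beq_iff_eq, pv_get?_counter, if_pos hx2]
      simp [hcnt x]
    · intro kv hkv
      rw [PySem.Dict.items_counter] at hkv
      obtain ⟨x, hx, rfl⟩ := List.mem_map.mp hkv
      have hx1 : x ∈ n1 := hp.symm.subset ((PySem.Set.mem_ofList _ _).mp hx)
      rw [beq_iff_eq, pv_get?_counter, if_pos hx1]
      simp [hcnt x]

lemma pvCountsB_eq_counter (scopes : List (Option String × Option String)) :
    pvCountsB scopes = PySem.Dict.counter (scopes.map (fun s => pvNormalizeA s.1 s.2)) := by
  rw [← PySem.Dict.foldl_insert_getD_add_one_eq_counter, List.foldl_map]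
  simp only [pvCountsB, pvNormB_eq]

-- ===== VERDICT (by name: the statement is the Claim_ definition above) =====
theorem scopes_are_meaningfully_different_spec : Claim_equal_scopes_are_meaningfully_different := by
  intro scopes1 scopes2 _hdom hpre
  unfold Spec_scopes_are_meaningfully_different
  unfold scopes_are_meaningfully_different scopes_are_meaningfully_different_alt
  set n1 := scopes1.map (fun s => pvNormalizeA s.1 s.2) with hn1
  set n2 := scopes2.map (fun s => pvNormalizeA s.1 s.2) with hn2
  have hiffB : (pvDictEqB (pvCountsB scopes1) (pvCountsB scopes2) = true) ↔ n1.Perm n2 := by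
    rw [pvCountsB_eq_counter, pvCountsB_eq_counter, pvDictEqB_counter_iff]
  by_cases hl : scopes1.length = scopes2.length
  swap
  · have hnp : ¬ n1.Perm n2 := fun hp => hl (by
      have := hp.length_eq; simpa [hn1, hn2] using this)
    have : pvDictEqB (pvCountsB scopes1) (pvCountsB scopes2) = false := by
      cases hq : pvDictEqB (pvCountsB scopes1) (pvCountsB scopes2) with
      | false => rfl
      | true => exact absurd (hiffB.mp hq) hnp
    simp [hl, this]
  · simp only [hl, ne_eq, not_true_eq_false, if_false]
    have hinj : ∀ (scopes : List (Option String × Option String)),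
        (¬ ((∃ p ∈ scopes, p.1 = none) ∧ (∃ p ∈ scopes, p.1 = some ""))) →
        ∀ a ∈ scopes.map (fun s => pvNormalizeA s.1 s.2),
        ∀ b ∈ scopes.map (fun s => pvNormalizeA s.1 s.2), pvKey a = pvKey b → a = b := by
      intro scopes hsc a ha b hb h
      obtain ⟨s, hs, rfl⟩ := List.mem_map.mp ha
      obtain ⟨t, ht, rfl⟩ := List.mem_map.mp hb
      rcases not_and_or.mp hsc with hno | hno <;> push Not at hno
      · refine pvKey_inj _ _ (Or.inr ⟨?_, ?_⟩) (pvNormalizeA_snd_ne _ _) (pvNormalizeA_snd_ne _ _) h <;>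
          rw [pvNormalizeA_fst]
        · exact hno s hs
        · exact hno t ht
      · refine pvKey_inj _ _ (Or.inl ⟨?_, ?_⟩) (pvNormalizeA_snd_ne _ _) (pvNormalizeA_snd_ne _ _) h <;>
          rw [pvNormalizeA_fst]
        · exact hno s hs
        · exact hno t ht
    have hiff : (PySem.List.sorted2 n1 (fun p => p.1.getD "") (fun p => p.2.getD "") false
        = PySem.List.sorted2 n2 (fun p => p.1.getD "") (fun p => p.2.getD "") false)
        ↔ (pvDictEqB (pvCountsB scopes1) (pvCountsB scopes2) = true) := by
      rw [pv_sorted2_eq_sorted_lex, pv_sorted2_eq_sorted_lex,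
          pv_sorted_eq_iff_perm pvKey n1 n2 (hinj scopes1 hpre.1), hiffB]
    cases hq : pvDictEqB (pvCountsB scopes1) (pvCountsB scopes2) with
    | true => simp [hiff.mpr hq]
    | false =>
      have : ¬ (PySem.List.sorted2 n1 (fun p => p.1.getD "") (fun p => p.2.getD "") false
          = PySem.List.sorted2 n2 (fun p => p.1.getD "") (fun p => p.2.getD "") false) := by
        intro h; rw [hiff] at h; rw [h] at hq; exact Bool.noConfusion hq
      simp [this]
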